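-- pv_equiv track=rewrite | github.com/abdullaabdullazade/codeforces-solutions | solutions/918A.py | r
-- ===== SOURCE A (Python) =====
-- def r(n):
--     fib = [1, 1]
--     while fib[-1] + fib[-2] <= n:
--         fib.append(fib[-1] + fib[-2])
--
--     name = []
--     for i in range(1, n + 1):
--         if i in fib:
--             name.append('O')
--         else:
--             name.append('o')
--
--     return ''.join(name)
-- ===== SOURCE B (Python) =====
-- def r(n):
--     name = ['o'] * n if n > 0 else []
--     a, b = 1, 1
--     while a <= n:
--         name[a - 1] = 'O'
--         a, b = b, a + b
--     return ''.join(name)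
-- ===== Notes on version B (the rewrite author's own statement) =====
-- stated objective: faster
-- what changed: Instead of building the full Fibonacci list and membership-scanning it for every position 1..n, B pre-fills a list of n 'o's and stamps 'O' directly at each Fibonacci position generated from two running variables.
import Mathlib
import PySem

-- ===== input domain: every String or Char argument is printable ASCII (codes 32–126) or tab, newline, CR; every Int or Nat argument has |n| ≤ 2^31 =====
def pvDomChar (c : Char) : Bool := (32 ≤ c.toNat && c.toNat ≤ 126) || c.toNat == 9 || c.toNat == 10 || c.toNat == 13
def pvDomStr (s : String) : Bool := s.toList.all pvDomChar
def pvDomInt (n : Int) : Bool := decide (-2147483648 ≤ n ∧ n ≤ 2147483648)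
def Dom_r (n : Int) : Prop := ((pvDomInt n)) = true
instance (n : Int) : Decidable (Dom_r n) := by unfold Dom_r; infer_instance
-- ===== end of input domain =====

-- B replaces A's per-position membership scan of the Fibonacci list by direct stamping of
-- Fibonacci positions into a pre-filled list of 'o's (objective: faster).

-- ===== PORT A =====
-- A's while loop appends fib[-1]+fib[-2] while it is ≤ n; the last two elements are carried
-- as parameters b2 = fib[-2], b1 = fib[-1] (the invariant argument only serves termination).
def rFibLoop (n b2 b1 : Int) (fib : List Int)
    (h : 1 ≤ b2 ∧ b2 ≤ b1 ∧ b1 ≤ 2 * b2) : List Int :=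
  if hle : b1 + b2 ≤ n then
    rFibLoop n b1 (b2 + b1) (fib ++ [b2 + b1]) ⟨by omega, by omega, by omega⟩
  else fib
termination_by (3 * n + 3 - (b2 + b1)).toNat
decreasing_by omega

-- ''.join of the one-character strings appended in the for-loop = the string of those chars (exact).
def r (n : Int) : String :=
  let fib := rFibLoop n 1 1 [1, 1] ⟨by norm_num, by norm_num, by norm_num⟩
  String.ofList ((PySem.List.pyRange 1 (n + 1) 1).map (fun i => if fib.contains i then 'O' else 'o'))

-- ===== PORT B =====
-- B's while loop stamps 'O' at position a-1 while a ≤ n (a,b are the running Fibonacci pair;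
-- the invariant argument only serves termination; a ≥ 1 so the index is in range as in Python).
def rStampLoop (n a b : Int) (name : List Char)
    (h : 1 ≤ a ∧ a ≤ b ∧ b ≤ 2 * a) : List Char :=
  if hle : a ≤ n then
    rStampLoop n b (a + b) (name.set (a - 1).toNat 'O') ⟨by omega, by omega, by omega⟩
  else name
termination_by (3 * n + 3 - (a + b)).toNat
decreasing_by omega

-- ['o'] * n (empty for n ≤ 0) = List.replicate n.toNat 'o'; ''.join of one-char strings = String.ofList.
def r_alt (n : Int) : String :=
  String.ofList (rStampLoop n 1 1 (List.replicate n.toNat 'o') ⟨by norm_num, by norm_num, by norm_num⟩)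

-- ===== PRECONDITION & SPEC =====
def Spec_r (n : Int) (out : String) : Prop := out = r_alt n
instance (n : Int) (out : String) : Decidable (Spec_r n out) := by unfold Spec_r; infer_instance

-- ===== CLAIM (what is proved, stated in full; the proofs are below) =====
def Claim_equal_r : Prop := ∀ (n : Int), Dom_r n → Spec_r n (r n)


-- ===== LEMMAS AND PROOFS =====

-- Reference stream: the Fibonacci values ≤ n generated from the pair (a, b).
def fibsLE (n a b : Int) (h : 1 ≤ a ∧ a ≤ b ∧ b ≤ 2 * a) : List Int :=
  if hle : a ≤ n then a :: fibsLE n b (a + b) ⟨by omega, by omega, by omega⟩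
  else []
termination_by (3 * n + 3 - (a + b)).toNat
decreasing_by omega

lemma fibsLE_congr (n a b a' b' : Int) (ha : a = a') (hb : b = b')
    (h : 1 ≤ a ∧ a ≤ b ∧ b ≤ 2 * a) (h' : 1 ≤ a' ∧ a' ≤ b' ∧ b' ≤ 2 * a') :
    fibsLE n a b h = fibsLE n a' b' h' := by
  subst ha; subst hb; rfl

lemma mem_fibsLE (n a b : Int) (h : 1 ≤ a ∧ a ≤ b ∧ b ≤ 2 * a) :
    ∀ v ∈ fibsLE n a b h, a ≤ v ∧ v ≤ n := by
  fun_induction fibsLE n a b h with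
  | case1 a b h hle ih =>
    intro v hv
    rcases List.mem_cons.mp hv with rfl | hv
    · exact ⟨le_refl _, hle⟩
    · have := ih v hv; omega
  | case2 => simp

lemma rFibLoop_eq (n b2 b1 : Int) (fib : List Int) (h : 1 ≤ b2 ∧ b2 ≤ b1 ∧ b1 ≤ 2 * b2) :
    rFibLoop n b2 b1 fib h
      = fib ++ fibsLE n (b2 + b1) (b2 + 2 * b1) ⟨by omega, by omega, by omega⟩ := by
  fun_induction rFibLoop n b2 b1 fib h with
  | case1 b2 b1 fib h hle ih =>
    rw [ih, List.append_assoc]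
    congr 1
    conv_rhs => rw [fibsLE, dif_pos (show b2 + b1 ≤ n by omega)]
    simp only [List.singleton_append]
    congr 1
    exact fibsLE_congr n _ _ _ _ (by ring) (by ring) _ _
  | case2 b2 b1 fib h hle =>
    conv_rhs => rw [fibsLE, dif_neg (show ¬ b2 + b1 ≤ n by omega)]
    simp

lemma rStampLoop_eq (n a b : Int) (name : List Char) (h : 1 ≤ a ∧ a ≤ b ∧ b ≤ 2 * a) :
    rStampLoop n a b name h
      = (fibsLE n a b h).foldl (fun nm v => nm.set (v - 1).toNat 'O') name := by
  fun_induction rStampLoop n a b name h with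
  | case1 a b name h hle ih =>
    rw [ih]
    conv_rhs => rw [fibsLE, dif_pos hle]
    simp only [List.foldl_cons]
  | case2 a b name h hle =>
    conv_rhs => rw [fibsLE, dif_neg hle]
    simp

lemma stamp_foldl_getElem? (L : List Int) (name : List Char) (j : Nat)
    (hL : ∀ v ∈ L, 1 ≤ v ∧ (v - 1).toNat < name.length) :
    (L.foldl (fun nm v => nm.set (v - 1).toNat 'O') name)[j]?
      = if ((j : Int) + 1) ∈ L then some 'O' else name[j]? := by
  induction L generalizing name with
  | nil => simp
  | cons v L ih =>
    simp only [List.foldl_cons]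
    have hv := hL v (List.mem_cons_self ..)
    rw [ih _ (by
      intro w hw
      have := hL w (List.mem_cons_of_mem _ hw)
      simpa [List.length_set] using this)]
    by_cases hmem : ((j : Int) + 1) ∈ L
    · simp [hmem]
    · simp only [List.mem_cons, hmem, or_false]
      by_cases hvj : v = (j : Int) + 1
      · have hidx : (v - 1).toNat = j := by omega
        rw [if_pos (hvj.symm), hidx, List.getElem?_set_self (by omega : j < name.length)]
        simp
      · have hidx : (v - 1).toNat ≠ j := by omega
        rw [if_neg (Ne.symm hvj), List.getElem?_set_ne hidx]
        simp

lemma mem_rFibLoop_iff (n i : Int) (hi1 : 1 ≤ i) (hin : i ≤ n)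
    (h : 1 ≤ (1 : Int) ∧ (1 : Int) ≤ 1 ∧ (1 : Int) ≤ 2 * 1)
    (h' : 1 ≤ (1 : Int) ∧ (1 : Int) ≤ 1 ∧ (1 : Int) ≤ 2 * 1) :
    (i ∈ rFibLoop n 1 1 [1, 1] h) ↔ (i ∈ fibsLE n 1 1 h') := by
  have hn : (1 : Int) ≤ n := le_trans hi1 hin
  rw [rFibLoop_eq]
  conv_rhs => rw [fibsLE, dif_pos hn, fibsLE, dif_pos hn]
  rw [fibsLE_congr n (1 + 1) (1 + (1 + 1)) (1 + 1) (1 + 2 * 1) rfl (by ring) _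
    ⟨by norm_num, by norm_num, by norm_num⟩]
  simp [List.mem_cons]

-- ===== VERDICT =====
theorem r_spec : Claim_equal_r := by
  intro n _
  unfold Spec_r r r_alt
  dsimp only
  congr 1
  rw [rStampLoop_eq, PySem.List.pyRange_one]
  have hnn : (n + 1 - 1) = n := by ring
  rw [hnn]
  have hfibs : ∀ v ∈ fibsLE n 1 1 ⟨by norm_num, by norm_num, by norm_num⟩,
      1 ≤ v ∧ (v - 1).toNat < (List.replicate n.toNat 'o').length := by
    intro v hv
    have := mem_fibsLE n 1 1 _ v hv
    simp only [List.length_replicate]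
    omega
  apply List.ext_getElem?
  intro j
  rw [stamp_foldl_getElem? _ _ _ hfibs]
  simp only [List.map_map, List.getElem?_map, List.getElem?_replicate]
  by_cases hj : j < n.toNat
  · rw [List.getElem?_range hj, if_pos hj]
    simp only [Option.map_some, Function.comp_apply]
    rw [show (1 : Int) + (j : Int) = (j : Int) + 1 by ring]
    have hiff := (List.contains_iff_mem).trans
      (mem_rFibLoop_iff n ((j : Int) + 1) (by omega) (by omega)
        ⟨by norm_num, by norm_num, by norm_num⟩ ⟨by norm_num, by norm_num, by norm_num⟩)
    simp only [hiff]
    by_cases hm : ((j : Int) + 1) ∈ fibsLE n 1 1 ⟨by norm_num, by norm_num, by norm_num⟩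
    · simp [hm]
    · simp [hm]
  · rw [List.getElem?_eq_none (by simp only [List.length_range]; omega)]
    simp only [Option.map_none]
    rw [if_neg hj]
    rw [if_neg (by
      intro hmem
      have := mem_fibsLE n 1 1 _ _ hmem
      omega)]
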